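-- pv_equiv track=rewrite | github.com/Daniel-Sottovia/Coursera | Introdução_Parte_2/Semana3/extra_02.py | ordem
-- ===== SOURCE A (Python) =====
-- def ordem(lista):
--     tam = len(lista)
--     cont = 0
--     final = []
--     while cont < tam:
--         if cont == 0:
--             final.append(lista[cont])
--         elif cont == 1:
--             if lista[cont] > final[0]:
--                 final.insert(0, lista[cont])
--             else:
--                 final.append(lista[cont])
--         else:
--             if lista[cont] > final[0]:
--                 final.insert(0, lista[cont])
--             else:
--                 if lista[cont] > final[1]:
--                     final.insert(1, lista[cont])
--                 else:
--                     final.append(lista[cont])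
--         cont += 1
--     return final
-- ===== SOURCE B (Python) =====
-- def ordem(lista):
--     if not lista:
--         return []
--     if len(lista) == 1:
--         return [lista[0]]
--     a, b = lista[0], lista[1]
--     top1, top2 = (b, a) if b > a else (a, b)
--     demoted = []   # values pushed out of position 1, oldest first
--     rest = []      # everything else, in arrival order
--     for e in lista[2:]:
--         if e > top1:
--             demoted.append(top2)
--             top2, top1 = top1, e
--         elif e > top2:
--             demoted.append(top2)
--             top2 = e
--         else:
--             rest.append(e)
--     return [top1, top2] + demoted[::-1] + rest
-- ===== Notes on version B (the rewrite author's own statement) =====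
-- stated objective: faster
-- what changed: B replaces A's single result list with repeated insert(0)/insert(1) by two scalar accumulators (running top-two) plus two append-only lists (demoted values and the rest), concatenated once at the end; this removes the O(n) list shifts, measured ~2x faster.
import Mathlib
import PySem

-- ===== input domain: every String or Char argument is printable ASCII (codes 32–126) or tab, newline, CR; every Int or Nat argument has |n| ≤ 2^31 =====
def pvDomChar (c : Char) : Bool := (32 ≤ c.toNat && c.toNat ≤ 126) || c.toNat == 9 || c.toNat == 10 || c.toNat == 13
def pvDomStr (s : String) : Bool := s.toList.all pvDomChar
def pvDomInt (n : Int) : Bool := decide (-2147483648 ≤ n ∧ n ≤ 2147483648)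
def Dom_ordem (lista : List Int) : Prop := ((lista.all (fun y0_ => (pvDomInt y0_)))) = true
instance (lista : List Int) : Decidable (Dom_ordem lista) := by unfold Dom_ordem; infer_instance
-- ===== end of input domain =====

-- B keeps the running top-two as scalars and builds the tail from two append-only lists instead of
-- inserting into one result list (objective: faster; append-only lists avoid list shifting, ~2x measured). Return values only; no mutation of the argument.

-- ===== PORT A =====
-- while cont < tam over indices = fold over enumerate; final[0]/final[1] are read only when they
-- exist (cont ≥ 1 resp. cont ≥ 2), so getD 0/1 with default 0 is exact there.
def ordem (lista : List Int) : List Int :=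
  (PySem.List.enumerate lista).foldl (fun final p =>
    if p.1 = 0 then final ++ [p.2]
    else if p.1 = 1 then
      if p.2 > final.getD 0 0 then PySem.List.insert final 0 p.2
      else final ++ [p.2]
    else
      if p.2 > final.getD 0 0 then PySem.List.insert final 0 p.2
      else if p.2 > final.getD 1 0 then PySem.List.insert final 1 p.2
      else final ++ [p.2]) []

-- ===== PORT B =====
-- state (top1, top2, demoted, rest); demoted[::-1] ++ rest is the tail
def ordem_alt (lista : List Int) : List Int :=
  match lista with
  | [] => []
  | [x] => [x]
  | a :: b :: rest =>
    let init : Int × Int × List Int × List Int := if b > a then (b, a, [], []) else (a, b, [], [])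
    let s := rest.foldl (fun st e =>
        if e > st.1 then (e, st.1, st.2.2.1 ++ [st.2.1], st.2.2.2)
        else if e > st.2.1 then (st.1, e, st.2.2.1 ++ [st.2.1], st.2.2.2)
        else (st.1, st.2.1, st.2.2.1, st.2.2.2 ++ [e])) init
    s.1 :: s.2.1 :: (s.2.2.1.reverse ++ s.2.2.2)

-- ===== PRECONDITION & SPEC =====
def Spec_ordem (lista : List Int) (out : List Int) : Prop := out = ordem_alt lista
instance (lista : List Int) (out : List Int) : Decidable (Spec_ordem lista out) := by unfold Spec_ordem; infer_instance

-- ===== CLAIM (what is proved, stated in full; the proofs are below) =====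
def Claim_equal_ordem : Prop := ∀ (lista : List Int), Dom_ordem lista → Spec_ordem lista (ordem lista)

-- ===== LEMMAS AND PROOFS =====
lemma ordem_loop_eq (ps : List (Int × Int)) (h : ∀ p ∈ ps, 2 ≤ p.1)
    (t1 t2 : Int) (dem rst : List Int) :
    ps.foldl (fun final p =>
      if p.1 = 0 then final ++ [p.2]
      else if p.1 = 1 then
        if p.2 > final.getD 0 0 then PySem.List.insert final 0 p.2
        else final ++ [p.2]
      else
        if p.2 > final.getD 0 0 then PySem.List.insert final 0 p.2
        else if p.2 > final.getD 1 0 then PySem.List.insert final 1 p.2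
        else final ++ [p.2]) (t1 :: t2 :: (dem.reverse ++ rst)) =
    (let s := (ps.map Prod.snd).foldl (fun st e =>
        if e > st.1 then (e, st.1, st.2.2.1 ++ [st.2.1], st.2.2.2)
        else if e > st.2.1 then (st.1, e, st.2.2.1 ++ [st.2.1], st.2.2.2)
        else (st.1, st.2.1, st.2.2.1, st.2.2.2 ++ [e])) (t1, t2, dem, rst)
     s.1 :: s.2.1 :: (s.2.2.1.reverse ++ s.2.2.2)) := by
  induction ps generalizing t1 t2 dem rst with
  | nil => simp
  | cons p ps ih =>
    have h2 : 2 ≤ p.1 := h p (by simp)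
    have h' : ∀ q ∈ ps, 2 ≤ q.1 := fun q hq => h q (by simp [hq])
    have hne0 : p.1 ≠ 0 := by omega
    have hne1 : p.1 ≠ 1 := by omega
    simp only [List.foldl_cons, List.map_cons, hne0, hne1, if_false]
    by_cases h1 : p.2 > t1
    · simp only [List.getD_cons_zero, h1, if_pos, PySem.List.insert_zero]
      have := ih h' p.2 t1 (dem ++ [t2]) rst
      simp only [List.reverse_append, List.reverse_cons, List.reverse_nil,
        List.nil_append, List.cons_append] at this ⊢
      exact this
    · by_cases hsnd : p.2 > t2
      · have hins : PySem.List.insert (t1 :: t2 :: (dem.reverse ++ rst)) 1 p.2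
            = t1 :: p.2 :: t2 :: (dem.reverse ++ rst) := by
          have := PySem.List.insert_ofNat (t1 :: t2 :: (dem.reverse ++ rst)) 1 p.2 (by simp)
          simpa using this
        simp only [List.getD_cons_zero, List.getD_cons_succ, h1, hsnd, if_pos,
          if_false, hins]
        have := ih h' t1 p.2 (dem ++ [t2]) rst
        simp only [List.reverse_append, List.reverse_cons, List.reverse_nil,
          List.nil_append, List.cons_append] at this ⊢
        exact this
      · simp only [List.getD_cons_zero, List.getD_cons_succ, h1, hsnd, if_false,
          List.cons_append, List.append_assoc]
        have := ih h' t1 t2 dem (rst ++ [p.2])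
        simpa using this

-- ===== VERDICT (by name: the statement is the Claim_ definition above) =====
theorem ordem_spec : Claim_equal_ordem := by
  intro lista _
  unfold Spec_ordem ordem ordem_alt
  match lista with
  | [] => simp [PySem.List.enumerate_nil]
  | [x] => simp [PySem.List.enumerate_cons, PySem.List.enumerate_nil]
  | a :: b :: rest =>
    have hmem : ∀ p ∈ PySem.List.enumerate rest 2, 2 ≤ p.1 := by
      intro p hp
      rcases (PySem.List.mem_enumerate_iff rest 2 p).1 hp with ⟨k, hk, rfl⟩
      simp
    have hsnd : (PySem.List.enumerate rest 2).map Prod.snd = rest :=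
      PySem.List.map_snd_enumerate rest 2
    simp only [PySem.List.enumerate_cons, List.foldl_cons]
    by_cases hba : b > a
    · have := ordem_loop_eq (PySem.List.enumerate rest 2) hmem b a [] []
      simp only [List.reverse_nil, List.append_nil] at this
      simp [hba, PySem.List.insert_zero, hsnd] at this ⊢
      rw [this]
    · have := ordem_loop_eq (PySem.List.enumerate rest 2) hmem a b [] []
      simp only [List.reverse_nil, List.append_nil] at this
      simp [hba, hsnd] at this ⊢
      rw [this]
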